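-- pv_equiv track=rewrite | github.com/JordanBarton/carrot47 | subarray_problem.py | sub_array_length
-- ===== SOURCE A (Python) =====
-- def sub_array_length(A):
--
--
--     A=sorted(A)
--
--     L=len(A)
--
--
--
--
--     i_change=0
--     for i in range(0,len(A)):
--
--         if A[i]==0:
--
--             pass
--
--         if A[i]==1:
--
--             i_change = i
--
--             break
--
--    #this tells us how many zeros
--     #if we have more 1s than this then this is the largest
--     #if we have less ones than the number of 1s is the largest
--
--     if i_change <= len(A)-i_change:
--
--             L=i_change
--
--
--     if i_change > len(A)-i_change:
--
--         L=len(A)-i_change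
--
--
--
--
--     return L
-- ===== SOURCE B (Python) =====
-- def sub_array_length(A):
--     count_lt1 = 0
--     has_one = False
--     for x in A:
--         if x < 1:
--             count_lt1 += 1
--         if x == 1:
--             has_one = True
--     i = count_lt1 if has_one else 0
--     return min(i, len(A) - i)
-- ===== Notes on version B (the rewrite author's own statement) =====
-- stated objective: faster
-- what changed: Replaces sorting plus an index scan for the first 1 with a single unsorted pass counting elements < 1 and checking whether 1 occurs, then returns the same min; O(n) instead of O(n log n), measured up to 5.3x on random inputs at n=262144 (near-constant inputs where Timsort is linear read ~1.5x).
import Mathlib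
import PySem

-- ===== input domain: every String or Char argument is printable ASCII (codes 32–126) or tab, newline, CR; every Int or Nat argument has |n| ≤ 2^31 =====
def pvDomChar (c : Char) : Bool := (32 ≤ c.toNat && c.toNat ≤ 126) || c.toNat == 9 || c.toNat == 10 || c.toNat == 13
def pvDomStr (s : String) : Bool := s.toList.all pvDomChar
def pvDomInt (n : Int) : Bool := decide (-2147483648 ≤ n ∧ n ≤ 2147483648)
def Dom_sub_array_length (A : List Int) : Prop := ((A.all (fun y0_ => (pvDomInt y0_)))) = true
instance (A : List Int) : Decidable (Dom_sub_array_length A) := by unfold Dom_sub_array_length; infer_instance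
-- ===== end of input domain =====

-- B replaces A's sort + index scan by a single pass counting elements < 1 and checking for a 1 (intended as faster, O(n) vs O(n log n); measured 5.3x on random inputs at n=262144).-


-- ===== PORT A =====
-- the for-loop over range(0,len(A)) with break: scans the sorted list left to right;
-- 'if A[i]==0: pass' is a no-op and is omitted; i_change stays 0 when no 1 is found
def pvFindOneIdx (s : List Int) (i : Int) : Int :=
  match s with
  | [] => 0
  | x :: rest => if x = 1 then i else pvFindOneIdx rest (i + 1)

def sub_array_length (A : List Int) : Int :=
  let s := PySem.List.sorted A (fun x => x) false      -- A = sorted(A)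
  let L : Int := (s.length : Int)                       -- L = len(A)
  let ic := pvFindOneIdx s 0                            -- the loop, i_change
  let L := if ic ≤ (s.length : Int) - ic then ic else L
  let L := if ic > (s.length : Int) - ic then (s.length : Int) - ic else L
  L

-- ===== PORT B =====
def sub_array_length_alt (A : List Int) : Int :=
  let st := A.foldl
    (fun (p : Int × Bool) x =>
      (if x < 1 then p.1 + 1 else p.1, if x = 1 then true else p.2))
    (0, false)
  let i := if st.2 then st.1 else 0
  min i ((A.length : Int) - i)

-- ===== PRECONDITION & SPEC =====
def Spec_sub_array_length (A : List Int) (out : Int) : Prop := out = sub_array_length_alt A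
instance (A : List Int) (out : Int) : Decidable (Spec_sub_array_length A out) := by unfold Spec_sub_array_length; infer_instance

-- ===== CLAIM (what is proved, stated in full; the proofs are below) =====
def Claim_equal_sub_array_length : Prop := ∀ (A : List Int), Dom_sub_array_length A → Spec_sub_array_length A (sub_array_length A)

-- ===== LEMMAS AND PROOFS =====

lemma pv_fold_spec (A : List Int) (c : Int) (b : Bool) :
    A.foldl (fun (p : Int × Bool) x =>
      (if x < 1 then p.1 + 1 else p.1, if x = 1 then true else p.2)) (c, b)
    = (c + (A.countP (fun x => decide (x < 1)) : Int), b || A.any (fun x => x == 1)) := by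
  induction A generalizing c b with
  | nil => simp
  | cons x rest ih =>
    simp only [List.foldl_cons, List.any_cons, ih, List.countP_cons, Prod.mk.injEq]
    refine ⟨?_, ?_⟩
    · by_cases h : x < 1 <;> simp [h] <;> omega
    · by_cases h : x = 1
      · simp [h]
      · have hb : (x == 1) = false := beq_eq_false_iff_ne.mpr h
        simp [h, hb]

lemma pv_findOne_not (s : List Int) (h1 : (1 : Int) ∉ s) (i : Int) :
    pvFindOneIdx s i = 0 := by
  induction s generalizing i with
  | nil => rfl
  | cons x rest ih =>
    simp only [List.mem_cons, not_or] at h1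
    simp [pvFindOneIdx, Ne.symm h1.1, ih h1.2]

lemma pv_findOne_mem (s : List Int) (hp : s.Pairwise (· ≤ ·)) (h1 : (1 : Int) ∈ s) (i : Int) :
    pvFindOneIdx s i = i + (s.countP (fun x => decide (x < 1)) : Int) := by
  induction s generalizing i with
  | nil => simp at h1
  | cons x rest ih =>
    rcases List.pairwise_cons.mp hp with ⟨hx, hrest⟩
    by_cases hx1 : x = 1
    · -- first element is 1: every later element is ≥ 1, so no element of the list is < 1
      have hcount : (x :: rest).countP (fun y => decide (y < 1)) = 0 := by
        subst hx1
        rw [List.countP_eq_zero]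
        intro y hy
        rcases List.mem_cons.mp hy with h | h
        · simp [h]
        · have := hx y h; simp; omega
      rw [show pvFindOneIdx (x :: rest) i = i by simp [pvFindOneIdx, hx1]]
      rw [hcount]; simp
    · have h1r : (1 : Int) ∈ rest := by
        rcases List.mem_cons.mp h1 with h | h
        · exact absurd h.symm hx1
        · exact h
      have hxlt : x < 1 := lt_of_le_of_ne (hx _ h1r) hx1
      simp only [pvFindOneIdx, if_neg hx1, ih hrest h1r, List.countP_cons]
      simp [hxlt]; ring

-- ===== VERDICT (by name: the statement is the Claim_ definition above) =====
theorem sub_array_length_spec : Claim_equal_sub_array_length := by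
  intro A _
  unfold Spec_sub_array_length sub_array_length sub_array_length_alt
  simp only [pv_fold_spec, Bool.false_or, Int.zero_add]
  set s := PySem.List.sorted A (fun x => x) false with hs
  have hperm : s.Perm A := PySem.List.sorted_perm A (fun x => x) false
  have hlen : s.length = A.length := hperm.length_eq
  have hcnt : s.countP (fun x => decide (x < 1)) = A.countP (fun x => decide (x < 1)) :=
    hperm.countP_eq _
  have hmem : ((1 : Int) ∈ s) ↔ ((1 : Int) ∈ A) := hperm.mem_iff
  have hany : (A.any (fun x => x == 1)) = decide ((1 : Int) ∈ A) := by
    by_cases h : (1 : Int) ∈ A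
    · simp only [h, decide_true, List.any_eq_true]
      exact ⟨1, h, by simp⟩
    · simp only [h, decide_false]
      simp only [List.any_eq_false, beq_iff_eq]
      intro x hx hx1
      exact h (hx1 ▸ hx)
  have hcle : (A.countP (fun x => decide (x < 1))) ≤ A.length := List.countP_le_length
  by_cases h1 : (1 : Int) ∈ A
  · have hfind := pv_findOne_mem s (PySem.List.sorted_pairwise A (fun x => x))
      (hmem.mpr h1) 0
    rw [hfind, hcnt] at *
    simp [hany, h1, hlen]
    omega
  · have hfind := pv_findOne_not s (fun h => h1 (hmem.mp h)) 0
    rw [hfind]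
    simp [hany, h1, hlen]
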